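-- pv_equiv track=rewrite | github.com/olga24912/SGTK | sgtk.py | get_align_from_sam_line
-- ===== SOURCE A (Python) =====
-- def parse_cigar(cigar):
--     letCnt = {'S': 0, 'H': 0, 'M': 0, '=': 0, 'X': 0, 'I': 0, 'D': 0, 'N': 0}
--     num = 0
--     for i in range(len(cigar)):
--         if (cigar[i].isdigit()):
--             num = int(num)*10 + int(cigar[i])
--         else:
--             letCnt[cigar[i]] += num
--             num = 0
--     return letCnt
--
-- def get_align_from_sam_line(line):
--     tokens = line.split("\t")
--     if (len(tokens) < 10):
--         return -1, -1, -1, -1, "", ""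
--
--     if (tokens[len(tokens) - 1] == '\n'):
--         tokens.pop()
--     if (tokens[len(tokens) - 1][-1] == '\n'):
--         tokens[len(tokens) - 1] = tokens[len(tokens) - 1][0:-1]
--
--     qcont = tokens[0]
--     rcont = tokens[2]
--     if (rcont == '*'):
--         return -1, -1, -1, -1, "", ""
--
--     l = int(tokens[3])
--     cigar = tokens[5]
--
--     cntSH = 0
--     while (cntSH < len(cigar) and (cigar[cntSH].isdigit() or cigar[cntSH] == 'S' or cigar[cntSH] == 'H') ):
--         cntSH += 1
--
--     letCnt = parse_cigar(cigar[:cntSH])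
--     lq = letCnt['S'] + letCnt['H']
--
--     letCnt = parse_cigar(cigar)
--
--     rq = lq + letCnt['M'] + letCnt['='] + letCnt['X'] + letCnt['I']
--     r = l + letCnt['M'] + letCnt['='] + letCnt['X'] + letCnt['D'] + letCnt['N']
--
--     if ((int(tokens[1]) & (1 << 4)) != 0):
--         rq, lq = lq, rq
--
--     return lq, rq, l, r, qcont, rcont
-- ===== SOURCE B (Python) =====
-- def _cigar_tokens(cigar):
--     """Tokenize a CIGAR string into ordered (count, op) pairs; a trailing
--     digit-only run with no op is dropped, as in the original parser."""
--     toks = []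
--     num = 0
--     for ch in cigar:
--         if ch.isdigit():
--             num = num * 10 + (ord(ch) - 48)
--         else:
--             toks.append((num, ch))
--             num = 0
--     return toks
--
--
-- def get_align_from_sam_line(line):
--     # The original's trailing-newline cleanup only rewrites the last token
--     # (index >= 8), which the result never reads, so it is omitted here.
--     tokens = line.split("\t")
--     if len(tokens) < 10:
--         return -1, -1, -1, -1, "", ""
--
--     qcont = tokens[0]
--     rcont = tokens[2]
--     if rcont == '*':
--         return -1, -1, -1, -1, "", ""
--
--     l = int(tokens[3])
--     ops = _cigar_tokens(tokens[5])
--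
--     counts = {'S': 0, 'H': 0, 'M': 0, '=': 0, 'X': 0, 'I': 0, 'D': 0, 'N': 0}
--     for n, op in ops:
--         counts[op] += n          # KeyError on an unknown CIGAR operator
--
--     lq = 0
--     for n, op in ops:
--         if op == 'S' or op == 'H':
--             lq += n
--         else:
--             break
--
--     rq = lq + counts['M'] + counts['='] + counts['X'] + counts['I']
--     r = l + counts['M'] + counts['='] + counts['X'] + counts['D'] + counts['N']
--
--     if int(tokens[1]) & 0x10:
--         rq, lq = lq, rq
--
--     return lq, rq, l, r, qcont, rcont
-- ===== Notes on version B (the rewrite author's own statement) =====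
-- stated objective: idiomatic
-- what changed: B tokenizes the CIGAR string once into an ordered (count, op) list and derives the soft/hard-clip prefix and the M/=/X/I/D/N totals from that token list, instead of A's char-by-char prefix scan plus two full dict-building re-parses of the string; B also omits the trailing-newline rewriting of the last token, which the result never reads.
import Mathlib
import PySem

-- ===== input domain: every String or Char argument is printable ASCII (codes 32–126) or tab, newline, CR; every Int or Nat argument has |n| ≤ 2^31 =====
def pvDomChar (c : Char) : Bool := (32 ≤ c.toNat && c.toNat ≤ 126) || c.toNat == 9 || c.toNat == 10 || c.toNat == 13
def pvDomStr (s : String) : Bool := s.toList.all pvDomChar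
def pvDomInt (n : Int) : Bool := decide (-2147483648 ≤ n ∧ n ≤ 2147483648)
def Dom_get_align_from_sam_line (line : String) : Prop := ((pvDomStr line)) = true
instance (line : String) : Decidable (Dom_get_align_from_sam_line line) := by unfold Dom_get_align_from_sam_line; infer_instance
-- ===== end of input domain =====

-- B re-derives the alignment from a single (count, op) tokenization of the CIGAR string instead of
-- A's char-level prefix scan plus two dict-building re-parses; return values agree on Pre_.

-- ===== PORT A =====

-- parse_cigar: dict of op counts, folded over the characters (letCnt[c] += num; KeyError outside Pre_)
def pvCigDict0 : PySem.Dict Char Int :=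
  PySem.Dict.ofList [('S', 0), ('H', 0), ('M', 0), ('=', 0), ('X', 0), ('I', 0), ('D', 0), ('N', 0)]

def parseCigarA (cigar : List Char) : PySem.Dict Char Int :=
  (cigar.foldl
    (fun (st : PySem.Dict Char Int × Int) c =>
      if PySem.Chars.isdigit c then (st.1, st.2 * 10 + ((c.toNat : Int) - 48))
      else (st.1.modify c 0 (· + st.2), 0))
    (pvCigDict0, 0)).1

-- the 'while cntSH < len(cigar) and …: cntSH += 1' scan, as structural recursion from the front
def shScanA : List Char → Nat
  | [] => 0
  | c :: cs => if PySem.Chars.isdigit c || c == 'S' || c == 'H' then shScanA cs + 1 else 0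

def get_align_from_sam_line (line : String) : Int × Int × Int × Int × String × String :=
  let tokens := PySem.Chars.splitOn line.toList ['\t']
  if tokens.length < 10 then (-1, -1, -1, -1, "", "") else
  let tokens2 := if PySem.List.pyGetD tokens ((tokens.length : Int) - 1) [] = ['\n']
                 then tokens.dropLast else tokens
  let lastTok := PySem.List.pyGetD tokens2 ((tokens2.length : Int) - 1) []
  -- tokens[-1][-1]: IndexError on an empty last token (excluded by Pre_; default is then unused)
  let tokens3 := if PySem.List.pyGetD lastTok (-1) ' ' = '\n'
                 then tokens2.dropLast ++ [PySem.List.slice lastTok none (some (-1))] else tokens2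
  let qcont := PySem.List.pyGetD tokens3 0 []
  let rcont := PySem.List.pyGetD tokens3 2 []
  if rcont = ['*'] then (-1, -1, -1, -1, "", "") else
  let l := (PySem.Int.ofChars? (PySem.List.pyGetD tokens3 3 [])).getD 0
  let cigar := PySem.List.pyGetD tokens3 5 []
  let cntSH := shScanA cigar
  let letCnt := parseCigarA (PySem.List.slice cigar none (some (cntSH : Int)))
  let lq := letCnt.getD 'S' 0 + letCnt.getD 'H' 0
  let letCnt2 := parseCigarA cigar
  let rq := lq + letCnt2.getD 'M' 0 + letCnt2.getD '=' 0 + letCnt2.getD 'X' 0 + letCnt2.getD 'I' 0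
  let r := l + letCnt2.getD 'M' 0 + letCnt2.getD '=' 0 + letCnt2.getD 'X' 0
             + letCnt2.getD 'D' 0 + letCnt2.getD 'N' 0
  let flag := (PySem.Int.ofChars? (PySem.List.pyGetD tokens3 1 [])).getD 0
  if Int.land flag 16 ≠ 0 then (rq, lq, l, r, String.ofList qcont, String.ofList rcont)  -- 16 = 1 << 4
  else (lq, rq, l, r, String.ofList qcont, String.ofList rcont)

-- ===== PORT B =====

-- _cigar_tokens: ordered (count, op) pairs; a trailing digit-only run is dropped
def cigTokensAlt (cigar : List Char) : List (Int × Char) :=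
  (cigar.foldl
    (fun (st : List (Int × Char) × Int) c =>
      if PySem.Chars.isdigit c then (st.1, st.2 * 10 + ((c.toNat : Int) - 48))
      else (st.1 ++ [(st.2, c)], 0))
    ([], 0)).1

def pvCigDict0Alt : PySem.Dict Char Int :=
  PySem.Dict.ofList [('S', 0), ('H', 0), ('M', 0), ('=', 0), ('X', 0), ('I', 0), ('D', 0), ('N', 0)]

-- the 'for n, op in ops: … else break' clip-prefix loop
def lqGoAlt : List (Int × Char) → Int
  | [] => 0
  | (n, c) :: ts => if c = 'S' ∨ c = 'H' then n + lqGoAlt ts else 0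

def get_align_from_sam_line_alt (line : String) : Int × Int × Int × Int × String × String :=
  let tokens := PySem.Chars.splitOn line.toList ['\t']
  if tokens.length < 10 then (-1, -1, -1, -1, "", "") else
  let qcont := PySem.List.pyGetD tokens 0 []
  let rcont := PySem.List.pyGetD tokens 2 []
  if rcont = ['*'] then (-1, -1, -1, -1, "", "") else
  let l := (PySem.Int.ofChars? (PySem.List.pyGetD tokens 3 [])).getD 0
  let ops := cigTokensAlt (PySem.List.pyGetD tokens 5 [])
  let counts := ops.foldl (fun d (p : Int × Char) => d.modify p.2 0 (· + p.1)) pvCigDict0Alt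
  let lq := lqGoAlt ops
  let rq := lq + counts.getD 'M' 0 + counts.getD '=' 0 + counts.getD 'X' 0 + counts.getD 'I' 0
  let r := l + counts.getD 'M' 0 + counts.getD '=' 0 + counts.getD 'X' 0
             + counts.getD 'D' 0 + counts.getD 'N' 0
  let flag := (PySem.Int.ofChars? (PySem.List.pyGetD tokens 1 [])).getD 0
  if Int.land flag 16 ≠ 0 then (rq, lq, l, r, String.ofList qcont, String.ofList rcont)
  else (lq, rq, l, r, String.ofList qcont, String.ofList rcont)

-- ===== PRECONDITION & SPEC =====
-- Pre_ excludes exactly the inputs where A raises: an empty (possibly post-pop) last token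
-- (IndexError), a non-int POS/FLAG field (ValueError), an unknown CIGAR operator (KeyError).
def Pre_get_align_from_sam_line (line : String) : Prop :=
  let ts := PySem.Chars.splitOn line.toList ['\t']
  ts.length < 10 ∨
  ((if ts.getLast? = some ['\n'] then ts.dropLast else ts).getLast?.getD [] ≠ [] ∧
   (ts.getD 2 [] = ['*'] ∨
     ((PySem.Int.ofChars? (ts.getD 3 [])).isSome = true ∧
      (PySem.Int.ofChars? (ts.getD 1 [])).isSome = true ∧
      (ts.getD 5 []).all
        (fun c => PySem.Chars.isdigit c || c ∈ (['S', 'H', 'M', '=', 'X', 'I', 'D', 'N'] : List Char)) = true)))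
instance (line : String) : Decidable (Pre_get_align_from_sam_line line) := by
  unfold Pre_get_align_from_sam_line; infer_instance

def pvWitness_get_align_from_sam_line : String :=
  "q1\t0\tref\t3\t60\t2S3M\t*\t0\t0\tACGT"

def Spec_get_align_from_sam_line (line : String) (out : Int × Int × Int × Int × String × String) : Prop := out = get_align_from_sam_line_alt line
instance (line : String) (out : Int × Int × Int × Int × String × String) : Decidable (Spec_get_align_from_sam_line line out) := by unfold Spec_get_align_from_sam_line; infer_instance

-- ===== CLAIM (what is proved, stated in full; the proofs are below) =====
def Claim_equal_get_align_from_sam_line : Prop := ∀ (line : String), Dom_get_align_from_sam_line line → Pre_get_align_from_sam_line line → Spec_get_align_from_sam_line line (get_align_from_sam_line line)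


-- ===== LEMMAS AND PROOFS =====

-- proof-side recursive view of the tokenizer, with an explicit pending number
def tokAux : List Char → Int → List (Int × Char)
  | [], _ => []
  | c :: cs, n =>
    if PySem.Chars.isdigit c then tokAux cs (n * 10 + ((c.toNat : Int) - 48))
    else (n, c) :: tokAux cs 0

lemma tokfoldB (cs : List Char) (acc : List (Int × Char)) (n : Int) :
    (cs.foldl
      (fun (st : List (Int × Char) × Int) c =>
        if PySem.Chars.isdigit c then (st.1, st.2 * 10 + ((c.toNat : Int) - 48))
        else (st.1 ++ [(st.2, c)], 0))
      (acc, n)).1 = acc ++ tokAux cs n := by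
  induction cs generalizing acc n with
  | nil => simp [tokAux]
  | cons c cs ih =>
    by_cases h : PySem.Chars.isdigit c
    · simp [tokAux, h, ih]
    · simp [tokAux, h, ih]

lemma cigTokensAlt_eq (cs : List Char) : cigTokensAlt cs = tokAux cs 0 := by
  simpa [cigTokensAlt] using tokfoldB cs [] 0

lemma tokfoldA (cs : List Char) (d : PySem.Dict Char Int) (n : Int) :
    (cs.foldl
      (fun (st : PySem.Dict Char Int × Int) c =>
        if PySem.Chars.isdigit c then (st.1, st.2 * 10 + ((c.toNat : Int) - 48))
        else (st.1.modify c 0 (· + st.2), 0))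
      (d, n)).1
    = (tokAux cs n).foldl (fun d (p : Int × Char) => d.modify p.2 0 (· + p.1)) d := by
  induction cs generalizing d n with
  | nil => simp [tokAux]
  | cons c cs ih =>
    by_cases h : PySem.Chars.isdigit c
    · simp [tokAux, h, ih]
    · simp [tokAux, h, ih]

lemma parseCigarA_eq (cs : List Char) :
    parseCigarA cs
      = (tokAux cs 0).foldl (fun d (p : Int × Char) => d.modify p.2 0 (· + p.1)) pvCigDict0 := by
  simpa [parseCigarA] using tokfoldA cs pvCigDict0 0

lemma take_shScanA (cs : List Char) :
    cs.take (shScanA cs)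
      = cs.takeWhile (fun c => PySem.Chars.isdigit c || c == 'S' || c == 'H') := by
  induction cs with
  | nil => simp [shScanA]
  | cons c cs ih =>
    by_cases h : (PySem.Chars.isdigit c || c == 'S' || c == 'H') = true
    · simp [shScanA, h, List.takeWhile, ih]
    · simp [shScanA, h, List.takeWhile]

lemma tokAux_takeWhile (cs : List Char) (n : Int) :
    tokAux (cs.takeWhile (fun c => PySem.Chars.isdigit c || c == 'S' || c == 'H')) n
      = (tokAux cs n).takeWhile (fun p : Int × Char => p.2 == 'S' || p.2 == 'H') := by
  induction cs generalizing n with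
  | nil => simp [tokAux]
  | cons c cs ih =>
    by_cases hd : PySem.Chars.isdigit c
    · simp [List.takeWhile, hd, tokAux, ih]
    · by_cases hs : (c == 'S' || c == 'H') = true
      · simp [List.takeWhile, hd, hs, tokAux, ih]
      · simp [List.takeWhile, hd, hs, tokAux]

lemma lqGoAlt_eq_sum (ts : List (Int × Char)) :
    lqGoAlt ts = ((ts.takeWhile (fun p : Int × Char => p.2 == 'S' || p.2 == 'H')).map Prod.fst).sum := by
  induction ts with
  | nil => simp [lqGoAlt]
  | cons p ts ih =>
    obtain ⟨n, c⟩ := p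
    by_cases h : (c == 'S' || c == 'H') = true
    · have h' : c = 'S' ∨ c = 'H' := by simpa using h
      simp [lqGoAlt, List.takeWhile, h, h', ih]
    · have h' : ¬ (c = 'S' ∨ c = 'H') := by simpa using h
      simp [lqGoAlt, List.takeWhile, h, h']

lemma sh_fold_sum (l : List (Int × Char)) (d : PySem.Dict Char Int)
    (hl : ∀ p ∈ l, p.2 = 'S' ∨ p.2 = 'H') :
    (l.foldl (fun d (p : Int × Char) => d.modify p.2 0 (· + p.1)) d).getD 'S' 0
      + (l.foldl (fun d (p : Int × Char) => d.modify p.2 0 (· + p.1)) d).getD 'H' 0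
      = d.getD 'S' 0 + d.getD 'H' 0 + (l.map Prod.fst).sum := by
  induction l generalizing d with
  | nil => simp
  | cons p l ih =>
    obtain ⟨n, c⟩ := p
    have hc : c = 'S' ∨ c = 'H' := hl (n, c) (by simp)
    have hrest : ∀ p ∈ l, p.2 = 'S' ∨ p.2 = 'H' := fun p hp => hl p (by simp [hp])
    rw [List.foldl_cons,
      ih (d.modify (n, c).2 0 (· + (n, c).1)) hrest]
    rcases hc with hc | hc <;> subst hc <;>
      simp [PySem.Dict.modify, PySem.Dict.getD_insert] <;> ring

-- reads at indices < 8 are unaffected by A's last-token surgery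
lemma getD_dropLast (ts : List (List Char)) (k : Nat) (hk : k + 1 < ts.length) (d : List Char) :
    ts.dropLast.getD k d = ts.getD k d := by
  have h : k < ts.length - 1 := by omega
  have h2 : k < ts.length := by omega
  simp [List.getD_eq_getElem?_getD, h, h2]

lemma getD_setLast (l : List (List Char)) (y : List Char) (k : Nat) (hk : k < l.length) (d : List Char) :
    (l ++ [y]).getD k d = l.getD k d := by
  simp [List.getD_eq_getElem?_getD, List.getElem?_append_left hk]

lemma lq_eq (cig : List Char) :
    (parseCigarA (PySem.List.slice cig none (some ((shScanA cig : Nat) : Int)))).getD 'S' 0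
      + (parseCigarA (PySem.List.slice cig none (some ((shScanA cig : Nat) : Int)))).getD 'H' 0
      = lqGoAlt (cigTokensAlt cig) := by
  have hmem : ∀ p ∈ (tokAux cig 0).takeWhile (fun p : Int × Char => p.2 == 'S' || p.2 == 'H'),
      p.2 = 'S' ∨ p.2 = 'H' := by
    intro p hp
    have := List.mem_takeWhile_imp hp
    simpa using this
  rw [PySem.List.slice_to_natCast, take_shScanA, parseCigarA_eq, tokAux_takeWhile,
      sh_fold_sum _ _ hmem, cigTokensAlt_eq, lqGoAlt_eq_sum]
  have hS : pvCigDict0.getD 'S' 0 = 0 := by decide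
  have hH : pvCigDict0.getD 'H' 0 = 0 := by decide
  rw [hS, hH]
  ring

lemma ports_eq (line : String) :
    get_align_from_sam_line line = get_align_from_sam_line_alt line := by
  unfold get_align_from_sam_line get_align_from_sam_line_alt
  generalize PySem.Chars.splitOn line.toList ['\t'] = ts
  by_cases h10 : ts.length < 10
  · simp [h10]
  · have hlen : 10 ≤ ts.length := by omega
    have hld : ts.dropLast.length = ts.length - 1 := List.length_dropLast
    have hr : ∀ (b1 : Prop) [Decidable b1] (b2 : Prop) [Decidable b2] (y : List Char) (k : Nat),
        k < 8 →
        (if b2 then (if b1 then ts.dropLast else ts).dropLast ++ [y]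
         else (if b1 then ts.dropLast else ts)).getD k [] = ts.getD k [] := by
      intro b1 _ b2 _ y k hk
      split_ifs with h1 h2 h2
      · rw [getD_setLast _ _ _ (by simp [hld]; omega), getD_dropLast _ _ (by omega),
            getD_dropLast _ _ (by omega)]
      · rw [getD_setLast _ _ _ (by simp [hld]; omega), getD_dropLast _ _ (by omega)]
      · rw [getD_dropLast _ _ (by omega)]
      · rfl
    simp only [if_neg h10, PySem.List.pyGetD_ofNat']
    rw [hr _ _ _ 0 (by omega), hr _ _ _ 2 (by omega), hr _ _ _ 3 (by omega),
        hr _ _ _ 5 (by omega), hr _ _ _ 1 (by omega)]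
    rw [lq_eq, parseCigarA_eq, cigTokensAlt_eq,
        show pvCigDict0 = pvCigDict0Alt from rfl]

-- ===== VERDICT (by name: the statement is the Claim_ definition above) =====
theorem get_align_from_sam_line_spec : Claim_equal_get_align_from_sam_line := by
  intro line _ _
  unfold Spec_get_align_from_sam_line
  exact ports_eq line
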